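-- pv_equiv track=rewrite | github.com/ajh1143/Code-Katas | Encrypt/Encrypt.py | encrypt
-- ===== SOURCE A (Python) =====
-- def encrypt(text, n):
--     if n <= 0:
--         return text
--     else:
--         i = 1
--         for each in range(n):
--             seconds = []
--             leftovers = []
--             i = 1
--             for x in text:
--                 if i%2 == 0:
--                     seconds.append(x)
--                     i+=1
--                 else:
--                     i+=1
--                     leftovers.append(x)
--                     pass
--             text = seconds + leftovers
--         return("".join(text))
-- ===== SOURCE B (Python) =====
-- def encrypt(text, n):
--     # Alternative implementation: the shuffle is the fixed index permutation
--     # sigma(j) = 2j+1 (j < L//2) / 2(j-L//2); for each output position find the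
--     # cycle length of j under sigma and walk only n mod cycle-length steps,
--     # so the work is independent of n.
--     if n <= 0:
--         return text
--     L = len(text)
--     h = L // 2
--
--     def sigma(j):
--         return 2 * j + 1 if j < h else 2 * (j - h)
--
--     out = []
--     for j in range(L):
--         # cycle length of j under sigma; the cycle through j has length <= L,
--         # so it is always found within L steps
--         c = None
--         p = sigma(j)
--         for steps in range(1, L + 1):
--             if p == j:
--                 c = steps
--                 break
--             p = sigma(p)
--         r = n % c if c is not None else n
--         p = j
--         for _ in range(r):
--             p = sigma(p)
--         out.append(text[p])
--     return "".join(out)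
-- ===== Notes on version B (the rewrite author's own statement) =====
-- stated objective: alternative
-- what changed: Instead of rebuilding the string n times, B computes the fixed index permutation sigma once and, per output position, walks sigma only (n mod cycle-length) steps after finding that position's cycle length, so its work is independent of n.
import Mathlib
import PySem

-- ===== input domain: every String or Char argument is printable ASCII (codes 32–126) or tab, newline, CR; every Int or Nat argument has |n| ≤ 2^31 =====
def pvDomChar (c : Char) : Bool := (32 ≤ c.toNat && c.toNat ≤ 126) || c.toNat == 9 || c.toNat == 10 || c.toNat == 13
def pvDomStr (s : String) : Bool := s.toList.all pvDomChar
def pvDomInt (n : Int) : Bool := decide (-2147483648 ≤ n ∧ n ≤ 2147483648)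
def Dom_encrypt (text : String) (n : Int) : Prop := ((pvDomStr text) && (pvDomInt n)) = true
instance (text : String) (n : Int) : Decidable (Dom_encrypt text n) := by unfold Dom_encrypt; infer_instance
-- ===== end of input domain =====

-- B replaces A's n-fold string rebuilding by applying the n-th power of the fixed
-- index permutation, reduced per position by its cycle length (work independent of n).


-- ===== PORT A =====
def encrypt (text : String) (n : Int) : String :=
  if n ≤ 0 then text
  else
    -- for each in range(n): rebuild text as seconds + leftovers (counter i starts at 1)
    let final := (PySem.List.pyRange 0 n 1).foldl
      (fun (t : List Char) _ =>
        let r := t.foldl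
          (fun (st : Nat × List Char × List Char) x =>
            if st.1 % 2 = 0 then (st.1 + 1, st.2.1 ++ [x], st.2.2)
            else (st.1 + 1, st.2.1, st.2.2 ++ [x]))
          (1, ([], []))
        r.2.1 ++ r.2.2)
      text.toList
    String.mk final

-- ===== PORT B =====
-- sigma(j) of Source B
def pvSigma (h j : Nat) : Nat := if j < h then 2 * j + 1 else 2 * (j - h)

-- Source B's bounded cycle search: 'for steps in range(1, L+1): if p == j: c = steps; break; p = sigma(p)'
def pvFindCyc (h j : Nat) : Nat → Nat → Nat → Option Nat
  | p, fuel + 1, steps =>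
      if p = j then some steps else pvFindCyc h j (pvSigma h p) fuel (steps + 1)
  | _, 0, _ => none

def encrypt_alt (text : String) (n : Int) : String :=
  if n ≤ 0 then text
  else
    let cs := text.toList
    let L := cs.length
    let h := L / 2
    let out := (List.range L).map (fun j =>
      let r : Nat :=
        match pvFindCyc h j (pvSigma h j) L 1 with
        | some c => (PySem.Int.mod n (c : Int)).toNat  -- n % c, both positive
        | none => n.toNat                              -- 'c is None' fallback of Source B
      -- 'for _ in range(r): p = sigma(p)'
      let p := (pvSigma h)^[r] j
      cs.getD p ' ')  -- text[p]; p < L always (sigma maps [0,L) into itself), so getD is exact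
    String.mk out

-- ===== PRECONDITION & SPEC =====
def Spec_encrypt (text : String) (n : Int) (out : String) : Prop := out = encrypt_alt text n
instance (text : String) (n : Int) (out : String) : Decidable (Spec_encrypt text n out) := by unfold Spec_encrypt; infer_instance

-- ===== CLAIM (what is proved, stated in full; the proofs are below) =====
def Claim_equal_encrypt : Prop := ∀ (text : String) (n : Int), Dom_encrypt text n → Spec_encrypt text n (encrypt text n)

-- ===== LEMMAS AND PROOFS =====

-- evens/odds of a list by position (deinter l = (elements at even indices, at odd indices))
def pvDeinter : List Char → List Char × List Char
  | [] => ([], [])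
  | x :: xs => (x :: (pvDeinter xs).2, (pvDeinter xs).1)

-- one round of A: seconds ++ leftovers = odds ++ evens
def pvStep (l : List Char) : List Char := (pvDeinter l).2 ++ (pvDeinter l).1

-- elements whose running counter (starting at i) is even / odd
def pvSelE : Nat → List Char → List Char
  | _, [] => []
  | i, x :: xs => if i % 2 = 0 then x :: pvSelE (i + 1) xs else pvSelE (i + 1) xs
def pvSelO : Nat → List Char → List Char
  | _, [] => []
  | i, x :: xs => if i % 2 = 0 then pvSelO (i + 1) xs else x :: pvSelO (i + 1) xs

theorem pvInner_spec (l : List Char) : ∀ (i : Nat) (s lo : List Char),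
    l.foldl
      (fun (st : Nat × List Char × List Char) x =>
        if st.1 % 2 = 0 then (st.1 + 1, st.2.1 ++ [x], st.2.2)
        else (st.1 + 1, st.2.1, st.2.2 ++ [x])) (i, s, lo)
    = (i + l.length, s ++ pvSelE i l, lo ++ pvSelO i l) := by
  induction l with
  | nil => intro i s lo; simp [pvSelE, pvSelO]
  | cons x xs ih =>
      intro i s lo
      simp only [List.foldl_cons, pvSelE, pvSelO]
      by_cases h : i % 2 = 0 <;> (simp [h, ih, List.append_assoc]; omega)

theorem pvSel_parity (l : List Char) : ∀ i : Nat,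
    (i % 2 = 1 → pvSelE i l = (pvDeinter l).2 ∧ pvSelO i l = (pvDeinter l).1) ∧
    (i % 2 = 0 → pvSelE i l = (pvDeinter l).1 ∧ pvSelO i l = (pvDeinter l).2) := by
  induction l with
  | nil => intro i; simp [pvSelE, pvSelO, pvDeinter]
  | cons x xs ih =>
      intro i
      constructor
      · intro hi
        have h0 : ¬ i % 2 = 0 := by omega
        have h1 := (ih (i + 1)).2 (by omega)
        simp [pvSelE, pvSelO, pvDeinter, h0, h1]
      · intro hi
        have := (ih (i + 1)).1 (by omega)
        simp [pvSelE, pvSelO, pvDeinter, hi, this]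

theorem pvDeinter_get? (l : List Char) : ∀ j : Nat,
    (pvDeinter l).1[j]? = l[2 * j]? ∧ (pvDeinter l).2[j]? = l[2 * j + 1]? := by
  induction l with
  | nil => intro j; simp [pvDeinter]
  | cons x xs ih =>
      intro j
      constructor
      · cases j with
        | zero => simp [pvDeinter]
        | succ k =>
            have e : 2 * (k + 1) = 2 * k + 1 + 1 := by ring
            show (x :: (pvDeinter xs).2)[k + 1]? = (x :: xs)[2 * (k + 1)]?
            rw [e, List.getElem?_cons_succ, List.getElem?_cons_succ, (ih k).2]
      · show (pvDeinter xs).1[j]? = (x :: xs)[2 * j + 1]?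
        rw [List.getElem?_cons_succ, (ih j).1]

theorem pvDeinter_len (l : List Char) :
    (pvDeinter l).1.length = (l.length + 1) / 2 ∧ (pvDeinter l).2.length = l.length / 2 := by
  induction l with
  | nil => simp [pvDeinter]
  | cons x xs ih => simp [pvDeinter, ih.1, ih.2] <;> omega

theorem pvStep_len (l : List Char) : (pvStep l).length = l.length := by
  have h := pvDeinter_len l
  simp [pvStep, h.1, h.2]
  try omega

theorem pvStep_get? (l : List Char) (j : Nat) :
    (pvStep l)[j]? = l[pvSigma (l.length / 2) j]? := by
  have hlen := pvDeinter_len l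
  have hget := pvDeinter_get? l
  by_cases hj : j < l.length / 2
  · have : j < (pvDeinter l).2.length := by omega
    rw [pvStep, List.getElem?_append_left this, pvSigma, if_pos hj]
    exact (hget j).2
  · have h2 : (pvDeinter l).2.length ≤ j := by omega
    rw [pvStep, List.getElem?_append_right h2, pvSigma, if_neg hj, hlen.2]
    exact (hget (j - l.length / 2)).1

theorem pvIter_get? : ∀ (k : Nat) (l : List Char) (j : Nat),
    (pvStep^[k] l)[j]? = l[(pvSigma (l.length / 2))^[k] j]? := by
  intro k
  induction k with
  | zero => intro l j; simp
  | succ m ih =>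
      intro l j
      rw [Function.iterate_succ_apply, ih, pvStep_len, pvStep_get?,
        ← Function.iterate_succ_apply' (pvSigma (l.length / 2))]

theorem pvIter_len : ∀ (k : Nat) (l : List Char), (pvStep^[k] l).length = l.length := by
  intro k
  induction k with
  | zero => intro l; simp
  | succ m ih => intro l; rw [Function.iterate_succ_apply, ih, pvStep_len]

theorem pvSigma_lt {L : Nat} (j : Nat) (hj : j < L) : pvSigma (L / 2) j < L := by
  unfold pvSigma; split <;> omega

theorem pvSigmaIter_lt {L : Nat} (k j : Nat) (hj : j < L) : (pvSigma (L / 2))^[k] j < L := by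
  induction k with
  | zero => simpa
  | succ m ih => rw [Function.iterate_succ_apply']; exact pvSigma_lt _ ih

theorem pvFindCyc_spec (h j : Nat) : ∀ (fuel p steps c : Nat), 0 < steps →
    p = (pvSigma h)^[steps] j → pvFindCyc h j p fuel steps = some c →
    (pvSigma h)^[c] j = j ∧ 0 < c := by
  intro fuel
  induction fuel with
  | zero => intro p steps c _ _ hc; simp [pvFindCyc] at hc
  | succ f ih =>
      intro p steps c hs hp hc
      rw [pvFindCyc] at hc
      by_cases hpj : p = j
      · rw [if_pos hpj] at hc
        cases hc
        exact ⟨by rw [← hp, hpj], hs⟩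
      · rw [if_neg hpj] at hc
        exact ih _ (steps + 1) c (by omega)
          (by rw [Function.iterate_succ_apply', ← hp]) hc

theorem pvIterate_mod {h : Nat} (c : Nat) (j : Nat) (hc : (pvSigma h)^[c] j = j)
    (m : Nat) : (pvSigma h)^[m] j = (pvSigma h)^[m % c] j := by
  conv_lhs => rw [show m = m % c + (m / c) * c by rw [Nat.mod_add_div']]
  induction m / c with
  | zero => simp
  | succ a iha =>
      have : m % c + (a + 1) * c = (m % c + a * c) + c := by ring
      rw [this, Function.iterate_add_apply, hc, iha]

theorem pvFoldl_const_iterate {α β : Type} (g : α → α) :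
    ∀ (xs : List β) (a : α), xs.foldl (fun t _ => g t) a = g^[xs.length] a := by
  intro xs
  induction xs with
  | nil => intro a; simp
  | cons x xs ih => intro a; simp [ih, Function.iterate_succ_apply]

-- A (for n > 0) is the n.toNat-th iterate of pvStep
theorem pvEncryptA (text : String) (n : Int) (hn : ¬ n ≤ 0) :
    encrypt text n = String.mk (pvStep^[n.toNat] text.toList) := by
  have hbody : ∀ t : List Char,
      (t.foldl
        (fun (st : Nat × List Char × List Char) x =>
          if st.1 % 2 = 0 then (st.1 + 1, st.2.1 ++ [x], st.2.2)
          else (st.1 + 1, st.2.1, st.2.2 ++ [x])) (1, ([], []))).2.1 ++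
      (t.foldl
        (fun (st : Nat × List Char × List Char) x =>
          if st.1 % 2 = 0 then (st.1 + 1, st.2.1 ++ [x], st.2.2)
          else (st.1 + 1, st.2.1, st.2.2 ++ [x])) (1, ([], []))).2.2 = pvStep t := by
    intro t
    have h1 := pvInner_spec t 1 [] []
    have h2 := (pvSel_parity t 1).1 (by norm_num)
    rw [h1]
    simp only [h2.1, h2.2, List.nil_append]
    rfl
  simp only [encrypt, if_neg hn, hbody]
  rw [pvFoldl_const_iterate, PySem.List.length_pyRange_one]
  congr 2
  omega

-- ===== VERDICT (by name: the statement is the Claim_ definition above) =====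
theorem encrypt_spec : Claim_equal_encrypt := by
  intro text n _
  unfold Spec_encrypt
  by_cases hn : n ≤ 0
  · rw [encrypt, encrypt_alt, if_pos hn, if_pos hn]
  · rw [pvEncryptA text n hn, encrypt_alt, if_neg hn]
    congr 1
    set cs := text.toList
    set L := cs.length with hL
    set h := L / 2 with hh
    set N := n.toNat with hN
    apply List.ext_getElem?
    intro j
    by_cases hj : j < L
    · -- both entries are cs[σ^[?] j]
      rw [pvIter_get?]
      rw [List.getElem?_map, List.getElem?_range hj]
      simp only [Option.map_some]
      -- compute B's char
      have key : ∀ r : Nat, (pvSigma h)^[N] j = (pvSigma h)^[r] j →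
          cs[(pvSigma h)^[N] j]? = some (cs.getD ((pvSigma h)^[r] j) ' ') := by
        intro r hr
        rw [hr]
        have hlt : (pvSigma h)^[r] j < L := pvSigmaIter_lt r j hj
        rw [List.getD_eq_getElem?_getD, List.getElem?_eq_getElem hlt]
        rfl
      cases hcyc : pvFindCyc h j (pvSigma h j) L 1 with
      | none => simp only; exact key N rfl
      | some c =>
          simp only
          have hc := pvFindCyc_spec h j L (pvSigma h j) 1 c (by omega)
            (by rw [Function.iterate_one]) hcyc
          have hmod : (PySem.Int.mod n (c : Int)).toNat = N % c := by
            have h1 : ((N : Nat) : Int) = n := by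
              rw [hN]; exact Int.toNat_of_nonneg (by omega)
            rw [PySem.Int.mod_eq_emod_of_pos (by exact_mod_cast hc.2), ← h1,
              ← Int.natCast_mod, Int.toNat_natCast]
          rw [hmod]
          exact key (N % c) (pvIterate_mod c j hc.1 N)
    · have h1 : (pvStep^[N] cs).length ≤ j := by rw [pvIter_len]; omega
      rw [List.getElem?_eq_none h1, List.getElem?_eq_none (by simp; omega)]
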